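-- pv_equiv track=rewrite | github.com/MakerofMarkers/Phonenix | wordanalysis.py | syllabify_english
-- ===== SOURCE A (Python) =====
-- EN_VOWELS = "aeiouy"
--
-- def syllabify_english(english_word):
--     syllables = []
--     current_syllable = ""
--
--     i = 0
--     while i < len(english_word):
--         current_syllable += english_word[i]
--
--         # If the character is a vowel and next character is not a vowel, it's the end of a syllable
--         if english_word[i] in EN_VOWELS:
--             # Check if next character is not a vowel or it's the last character
--             if i == len(english_word) - 1 or english_word[i + 1] not in EN_VOWELS:
--                 syllables.append(current_syllable)
--                 current_syllable = ""
--
--         i += 1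
--
--     # Append remaining characters to last syllable
--     if current_syllable:
--         if syllables:
--             syllables[-1] += current_syllable
--         else:
--             syllables.append(current_syllable)
--
--     return syllables
-- ===== SOURCE B (Python) =====
-- EN_VOWELS = "aeiouy"
--
-- def syllabify_english(english_word):
--     # Right-to-left single pass: collect syllables back-to-front, keeping the
--     # trailing run after the last syllable boundary separate, then merge it.
--     rev_sylls = []   # syllables of the processed suffix, last-to-first; each as reversed char list
--     rev_tail = []    # chars to the right of every boundary, reversed
--     nxt = None       # character immediately to the right of the current one
--     for c in reversed(english_word):
--         if c in EN_VOWELS and (nxt is None or nxt not in EN_VOWELS):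
--             rev_sylls.append([c])
--         elif rev_sylls:
--             rev_sylls[-1].append(c)
--         else:
--             rev_tail.append(c)
--         nxt = c
--     sylls = ["".join(reversed(chars)) for chars in reversed(rev_sylls)]
--     tail = "".join(reversed(rev_tail))
--     if not tail:
--         return sylls
--     if not sylls:
--         return [tail]
--     return sylls[:-1] + [sylls[-1] + tail]
-- ===== Notes on version B (the rewrite author's own statement) =====
-- stated objective: alternative
-- what changed: B replaces A's left-to-right while-loop (growing a current_syllable string and patching the trailing remainder into the last syllable afterwards) with a single right-to-left pass that builds the syllables back-to-front, keeping the trailing run after the last boundary separate and merging it once at the end.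
import Mathlib
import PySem

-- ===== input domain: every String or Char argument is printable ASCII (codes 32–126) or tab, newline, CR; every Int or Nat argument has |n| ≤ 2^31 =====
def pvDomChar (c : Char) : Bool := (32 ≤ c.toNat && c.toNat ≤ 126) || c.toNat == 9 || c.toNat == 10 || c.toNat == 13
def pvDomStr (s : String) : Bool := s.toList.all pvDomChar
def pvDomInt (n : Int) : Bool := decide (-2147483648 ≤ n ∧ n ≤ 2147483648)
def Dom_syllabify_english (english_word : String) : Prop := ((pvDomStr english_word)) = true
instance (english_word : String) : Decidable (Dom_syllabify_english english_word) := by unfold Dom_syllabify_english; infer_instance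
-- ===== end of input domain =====

-- B replaces A's left-to-right while-loop (growing current_syllable, appending on each
-- boundary, patching the tail in afterwards) by a single right-to-left pass that builds
-- the syllables back-to-front; objective: alternative decomposition, same O(n) cost.

-- 'c in EN_VOWELS' for a single character is exactly character membership
def isVowelEn (c : Char) : Bool := "aeiouy".toList.contains c

-- syllables[-1] += t  when syllables is nonempty, else [t]  (the shared Python merge snippet)
def lastPlus : List (List Char) → List Char → List (List Char)
  | [], t => [t]
  | [s], t => [s ++ t]
  | s :: ss, t => s :: lastPlus ss t

-- ===== PORT A =====
-- the while-loop, state = (current_syllable, syllables); returns (syllables, current_syllable)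
def goA : List Char → List Char → List (List Char) → List (List Char) × List Char
  | [], cur, sylls => (sylls, cur)
  | c :: rest, cur, sylls =>
    let cur' := cur ++ [c]
    if isVowelEn c && (match rest with | [] => true | d :: _ => !isVowelEn d) then
      goA rest [] (sylls ++ [cur'])
    else
      goA rest cur' sylls

def syllabify_english (english_word : String) : List String :=
  let p := goA english_word.toList [] []
  (if p.2 ≠ [] then lastPlus p.1 p.2 else p.1).map String.ofList

-- ===== PORT B =====
-- rev_sylls[-1].append(c)
def appendIntoLast : List (List Char) → Char → List (List Char)
  | [], _ => []
  | [s], c => [s ++ [c]]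
  | s :: ss, c => s :: appendIntoLast ss c

-- one step of B's reversed loop; state = (rev_sylls, rev_tail, nxt)
def stepB (st : List (List Char) × List Char × Option Char) (c : Char) :
    List (List Char) × List Char × Option Char :=
  let (rs, rt, _nxt) := st
  if isVowelEn c && (match st.2.2 with | none => true | some d => !isVowelEn d) then
    (rs ++ [[c]], rt, some c)
  else if rs ≠ [] then
    (appendIntoLast rs c, rt, some c)
  else
    (rs, rt ++ [c], some c)

def syllabify_english_alt (english_word : String) : List String :=
  let st := english_word.toList.reverse.foldl stepB ([], [], none)
  let sylls := st.1.reverse.map List.reverse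
  let tail := st.2.1.reverse
  (match tail with
   | [] => sylls
   | _ :: _ => lastPlus sylls tail).map String.ofList

-- ===== PRECONDITION & SPEC =====
def Spec_syllabify_english (english_word : String) (out : List String) : Prop := out = syllabify_english_alt english_word
instance (english_word : String) (out : List String) : Decidable (Spec_syllabify_english english_word out) := by unfold Spec_syllabify_english; infer_instance

-- ===== CLAIM (what is proved, stated in full; the proofs are below) =====
def Claim_equal_syllabify_english : Prop := ∀ (english_word : String), Dom_syllabify_english english_word → Spec_syllabify_english english_word (syllabify_english english_word)

-- ===== LEMMAS AND PROOFS =====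

-- proof device: (complete syllables, trailing chars after the last boundary)
def splitB : List Char → List (List Char) × List Char
  | [] => ([], [])
  | c :: rest =>
    let p := splitB rest
    if isVowelEn c && (match rest with | [] => true | d :: _ => !isVowelEn d) then
      ([c] :: p.1, p.2)
    else
      match p.1 with
      | [] => ([], c :: p.2)
      | s0 :: ss => ((c :: s0) :: ss, p.2)

lemma condEq (cs : List Char) :
    (match cs.head? with | none => true | some d => !isVowelEn d)
      = (match cs with | [] => true | d :: _ => !isVowelEn d) := by
  cases cs <;> rfl

lemma appendIntoLast_append (xs : List (List Char)) (y : List Char) (c : Char) :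
    appendIntoLast (xs ++ [y]) c = xs ++ [y ++ [c]] := by
  induction xs with
  | nil => rfl
  | cons x xs ih =>
    cases xs with
    | nil => rfl
    | cons x' xs' => simp [appendIntoLast] at ih ⊢; exact ih

lemma goA_splitB (cs : List Char) : ∀ cur sylls, goA cs cur sylls =
    (match (splitB cs).1 with
     | [] => (sylls, cur ++ (splitB cs).2)
     | s0 :: ss => (sylls ++ (cur ++ s0) :: ss, (splitB cs).2)) := by
  induction cs with
  | nil => intro cur sylls; simp [goA, splitB]
  | cons c rest ih =>
    intro cur sylls
    simp only [goA, splitB, ih]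
    cases h : (splitB rest).1 with
    | nil => split_ifs with hb <;> simp
    | cons s0 ss => split_ifs with hb <;> simp

lemma foldr_stepB (cs : List Char) :
    cs.foldr (fun c st => stepB st c) ([], [], none) =
      (((splitB cs).1.map List.reverse).reverse, (splitB cs).2.reverse, cs.head?) := by
  induction cs with
  | nil => rfl
  | cons c rest ih =>
    rw [List.foldr_cons, ih]
    simp only [stepB, condEq rest, splitB]
    cases h : (splitB rest).1 with
    | nil =>
      split_ifs with hb h2
      · simp
      · simp at h2
      · simp
    | cons s0 ss =>
      split_ifs with hb h2
      · simp
      · rw [show (List.map List.reverse (s0 :: ss)).reverse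
              = (List.map List.reverse ss).reverse ++ [s0.reverse] by simp,
            appendIntoLast_append]
        simp
      · simp at h2

-- ===== VERDICT (by name: the statement is the Claim_ definition above) =====
theorem syllabify_english_spec : Claim_equal_syllabify_english := by
  intro w _
  unfold Spec_syllabify_english syllabify_english syllabify_english_alt
  rw [List.foldl_reverse, foldr_stepB, goA_splitB]
  cases h : (splitB w.toList).1 with
  | nil =>
    simp only [List.map_nil, List.reverse_nil, List.reverse_reverse, List.nil_append]
    cases ht : (splitB w.toList).2 with
    | nil => simp
    | cons a t => simp [lastPlus]
  | cons s0 ss =>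
    simp only [List.reverse_reverse, List.map_map, List.nil_append]
    cases ht : (splitB w.toList).2 with
    | nil => simp
    | cons a t => simp
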